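-- pv_equiv track=rewrite | github.com/reposfda/monterrey | utils/text_wrapper.py | wrap_two_lines
-- ===== SOURCE A (Python) =====
-- def wrap_two_lines(text: str, max_chars: int = 28) -> str:
--     """
--     Wrap simple: divide en máx 2 líneas (por palabras) si supera max_chars.
--     Ideal para monospace en headers, títulos y leyendas.
--     """
--     s = (text or "").strip()
--     if not s:
--         return ""
--     if len(s) <= max_chars:
--         return s
--
--     words = s.split()
--     line1, line2 = "", ""
--
--     for i, w in enumerate(words):
--         test = (line1 + " " + w).strip()
--         if len(test) <= max_chars:
--             line1 = test
--         else:
--             # todo lo restante va a la segunda línea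
--             line2 = " ".join(words[i:]).strip()
--             break
--
--     if not line2:
--         return line1
--
--     # si la 2da línea quedó larguísima, la cortamos suave
--     if len(line2) > max_chars:
--         line2 = line2[: max_chars - 1].rstrip() + "…"
--
--     return f"{line1}\n{line2}"
-- ===== SOURCE B (Python) =====
-- from itertools import accumulate
-- from bisect import bisect_right
--
--
-- def wrap_two_lines(text: str, max_chars: int = 28) -> str:
--     s = (text or "").strip()
--     if not s:
--         return ""
--     if len(s) <= max_chars:
--         return s
--
--     words = s.split()
--     # cum[j-1] = len(" ".join(words[:j])); strictly increasing
--     cum = list(accumulate((len(w) for w in words), lambda a, b: a + 1 + b))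
--     k = bisect_right(cum, max_chars)
--
--     line1 = " ".join(words[:k])
--     if k == len(words):
--         return line1
--
--     line2 = " ".join(words[k:])
--     if len(line2) > max_chars:
--         line2 = line2[: max_chars - 1].rstrip() + "…"
--     return line1 + "\n" + line2
-- ===== Notes on version B (the rewrite author's own statement) =====
-- stated objective: alternative
-- what changed: A's greedy loop that rebuilds and re-strips line1 word by word is replaced by a cumulative prefix-length table (itertools.accumulate) and a bisect_right over it to find the split index in one step.
import Mathlib
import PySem

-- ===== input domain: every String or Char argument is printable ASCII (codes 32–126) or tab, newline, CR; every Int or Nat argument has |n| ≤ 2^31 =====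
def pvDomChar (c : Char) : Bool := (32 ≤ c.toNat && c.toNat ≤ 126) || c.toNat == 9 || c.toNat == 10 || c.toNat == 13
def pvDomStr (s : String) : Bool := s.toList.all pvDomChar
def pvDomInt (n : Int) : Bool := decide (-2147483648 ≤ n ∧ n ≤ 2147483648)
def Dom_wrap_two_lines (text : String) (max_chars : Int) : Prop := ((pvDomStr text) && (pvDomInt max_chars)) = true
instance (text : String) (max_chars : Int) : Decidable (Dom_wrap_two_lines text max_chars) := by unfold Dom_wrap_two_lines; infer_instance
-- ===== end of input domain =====

-- B replaces A's greedy retest loop (rebuild line1 and strip at every word) by a prefix-length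
-- table (itertools.accumulate) plus bisect_right to find the split index (objective: alternative).

-- ===== PORT A =====
-- the 'for i, w in enumerate(words)' loop; state = line1; words[i:] is the current suffix;
-- an empty second component encodes 'loop finished with no break' (line2 left "")
def wrapALoop (max_chars : Int) : List String → String → String × String
  | [], line1 => (line1, "")
  | w :: rest, line1 =>
      let test := PySem.Str.strip (line1 ++ " " ++ w)
      if PySem.Str.len test ≤ max_chars then wrapALoop max_chars rest test
      else (line1, PySem.Str.strip (PySem.Str.join " " (w :: rest)))

def wrap_two_lines (text : String) (max_chars : Int) : String :=
  let s := PySem.Str.strip text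
  if s = "" then ""
  else if PySem.Str.len s ≤ max_chars then s
  else
    let words := PySem.Str.split₀ s
    let r := wrapALoop max_chars words ""
    let line1 := r.1
    let line2 := r.2
    if line2 = "" then line1
    else
      let line2 := if max_chars < PySem.Str.len line2
        then PySem.Str.rstrip (PySem.Str.slice line2 none (some (max_chars - 1))) ++ "…"
        else line2
      line1 ++ "\n" ++ line2

-- ===== PORT B =====
def accumStep (acc : Int) : List Int → List Int
  | [] => []
  | b :: bs => (acc + 1 + b) :: accumStep (acc + 1 + b) bs

-- itertools.accumulate with the two-arg lambda: out[0] = lens[0], out[i] = out[i-1] + 1 + lens[i]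
def accumulate1 : List Int → List Int
  | [] => []
  | l :: ls => l :: accumStep l ls

def wrap_two_lines_alt (text : String) (max_chars : Int) : String :=
  let s := PySem.Str.strip text
  if s = "" then ""
  else if PySem.Str.len s ≤ max_chars then s
  else
    let words := PySem.Str.split₀ s
    let cum : List Int := accumulate1 (words.map PySem.Str.len)
    let k := PySem.List.bisectRight cum max_chars
    let line1 := PySem.Str.join " " (words.take k)
    if k = words.length then line1
    else
      let line2 := PySem.Str.join " " (words.drop k)
      let line2 := if max_chars < PySem.Str.len line2
        then PySem.Str.rstrip (PySem.Str.slice line2 none (some (max_chars - 1))) ++ "…"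
        else line2
      line1 ++ "\n" ++ line2

-- ===== PRECONDITION & SPEC =====
def Spec_wrap_two_lines (text : String) (max_chars : Int) (out : String) : Prop := out = wrap_two_lines_alt text max_chars
instance (text : String) (max_chars : Int) (out : String) : Decidable (Spec_wrap_two_lines text max_chars out) := by unfold Spec_wrap_two_lines; infer_instance

-- ===== CLAIM (what is proved, stated in full; the proofs are below) =====
def Claim_equal_wrap_two_lines : Prop := ∀ (text : String) (max_chars : Int), Dom_wrap_two_lines text max_chars → Spec_wrap_two_lines text max_chars (wrap_two_lines text max_chars)

-- ===== LEMMAS AND PROOFS =====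

def GoodC (w : List Char) : Prop := w ≠ [] ∧ ∀ c ∈ w, PySem.Chars.isspace c = false

lemma lstrip_cons (c : Char) (t : List Char) (h : PySem.Chars.isspace c = false) :
    PySem.Chars.lstrip (c :: t) = c :: t := by
  simp [PySem.Chars.lstrip, h]

lemma rstrip_concat (l : List Char) (c : Char) (h : PySem.Chars.isspace c = false) :
    PySem.Chars.rstrip (l ++ [c]) = l ++ [c] := by
  simp [PySem.Chars.rstrip, h]

-- join of nonempty good words starts with a non-space char
lemma join_head (ws : List (List Char)) (hne : ws ≠ []) (hg : ∀ w ∈ ws, GoodC w) :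
    ∃ c t, PySem.Chars.join [' '] ws = c :: t ∧ PySem.Chars.isspace c = false := by
  match ws with
  | [w] =>
      obtain ⟨hne', hs⟩ := hg w (by simp)
      obtain ⟨c, t, rfl⟩ := List.exists_cons_of_ne_nil hne'
      exact ⟨c, t, by simp [PySem.Chars.join_singleton], hs c (by simp)⟩
  | w :: w' :: rest =>
      obtain ⟨hne', hs⟩ := hg w (by simp)
      obtain ⟨c, t, rfl⟩ := List.exists_cons_of_ne_nil hne'
      refine ⟨c, t ++ [' '] ++ PySem.Chars.join [' '] (w' :: rest), ?_, hs c (by simp)⟩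
      rw [PySem.Chars.join_cons_cons]; simp

lemma join_last (ws : List (List Char)) (hne : ws ≠ []) (hg : ∀ w ∈ ws, GoodC w) :
    ∃ l c, PySem.Chars.join [' '] ws = l ++ [c] ∧ PySem.Chars.isspace c = false := by
  match ws with
  | [w] =>
      obtain ⟨hne', hs⟩ := hg w (by simp)
      obtain ⟨l, c, rfl⟩ := List.eq_nil_or_concat w |>.resolve_left hne'
      exact ⟨l, c, by simp [PySem.Chars.join_singleton], hs c (by simp)⟩
  | w :: w' :: rest =>
      obtain ⟨l, c, h, hs⟩ := join_last (w' :: rest) (by simp) (fun x hx => hg x (by simp [hx]))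
      refine ⟨w ++ [' '] ++ l, c, ?_, hs⟩
      rw [PySem.Chars.join_cons_cons, h]; simp

lemma strip_join (ws : List (List Char)) (hne : ws ≠ []) (hg : ∀ w ∈ ws, GoodC w) :
    PySem.Chars.strip (PySem.Chars.join [' '] ws) = PySem.Chars.join [' '] ws := by
  obtain ⟨c, t, hh, hcs⟩ := join_head ws hne hg
  obtain ⟨l, c', hl, hcs'⟩ := join_last ws hne hg
  rw [PySem.Chars.strip, hh, lstrip_cons _ _ hcs, ← hh, hl, rstrip_concat _ _ hcs']

lemma good_go : ∀ (s cur : List Char) (acc : List (List Char)),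
    (∀ c ∈ cur, PySem.Chars.isspace c = false) →
    (∀ w ∈ acc, GoodC w) →
    ∀ w ∈ PySem.Chars.split₀.go s cur acc, GoodC w
  | [], cur, acc, hcur, hacc => by
      unfold PySem.Chars.split₀.go
      by_cases hc : cur = []
      · simp [hc]; intro w hw; exact hacc w hw
      · simp [List.isEmpty_iff, hc]
        intro w hw
        rcases hw with hw | hw
        · exact hacc w hw
        · subst hw
          exact ⟨by simpa using hc, fun c hc' => hcur c (by simpa using hc')⟩
  | c :: rest, cur, acc, hcur, hacc => by
      unfold PySem.Chars.split₀.go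
      by_cases hs : PySem.Chars.isspace c = true
      · simp only [hs, if_true]
        by_cases hc : cur = []
        · simp [hc]
          exact good_go rest [] acc (by simp) hacc
        · simp [List.isEmpty_iff, hc]
          refine good_go rest [] _ (by simp) ?_
          intro w hw
          rcases List.mem_cons.mp hw with hw | hw
          · subst hw
            exact ⟨by simpa using hc, fun c' hc' => hcur c' (by simpa using hc')⟩
          · exact hacc w hw
      · simp only [hs, if_false, Bool.false_eq_true]
        refine good_go rest (c :: cur) acc ?_ hacc
        intro c' hc'
        rcases List.mem_cons.mp hc' with h | h
        · subst h; simpa using hs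
        · exact hcur c' h

lemma good_split₀C (s : List Char) : ∀ w ∈ PySem.Chars.split₀ s, GoodC w := by
  intro w hw
  exact good_go s [] [] (by simp) (by simp) w hw

-- join over a snoc, for nonempty prefix
lemma join_concat (sep : List Char) : ∀ (xs : List (List Char)), xs ≠ [] → ∀ (y : List Char),
    PySem.Chars.join sep (xs ++ [y]) = PySem.Chars.join sep xs ++ sep ++ y
  | [x], _, y => by rw [List.singleton_append, PySem.Chars.join_cons_cons, PySem.Chars.join_singleton, PySem.Chars.join_singleton]
  | x :: x' :: rest, _, y => by
      simp only [List.cons_append]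
      rw [PySem.Chars.join_cons_cons, PySem.Chars.join_cons_cons, ← List.cons_append,
        join_concat sep (x' :: rest) (by simp) y]
      simp

def GoodS (w : String) : Prop := GoodC w.toList

lemma good_split₀ (s : String) : ∀ w ∈ PySem.Str.split₀ s, GoodS w := by
  intro w hw
  rw [PySem.Str.split₀.eq_1] at hw
  obtain ⟨w', hw', rfl⟩ := List.mem_map.mp hw
  unfold GoodS
  rw [String.toList_ofList]
  exact good_split₀C _ w' hw'

lemma strip_goodC (w : List Char) (h : GoodC w) : PySem.Chars.strip w = w := by
  obtain ⟨c, t, rfl⟩ := List.exists_cons_of_ne_nil h.1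
  obtain ⟨l, c', hl⟩ := List.eq_nil_or_concat (c :: t) |>.resolve_left (by simp)
  simp only [List.concat_eq_append] at hl
  rw [PySem.Chars.strip, lstrip_cons _ _ (h.2 c (by simp)), hl,
    rstrip_concat _ _ (h.2 c' (by rw [hl]; simp))]

lemma strip_space_cons (w : List Char) (h : GoodC w) :
    PySem.Chars.strip (' ' :: w) = w := by
  have hsp : PySem.Chars.isspace ' ' = true := by decide
  have : PySem.Chars.lstrip (' ' :: w) = PySem.Chars.lstrip w := by
    simp [PySem.Chars.lstrip, hsp]
  rw [PySem.Chars.strip, this, ← PySem.Chars.strip, strip_goodC w h]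

lemma toList_join_sp (ws : List String) :
    (PySem.Str.join " " ws).toList = PySem.Chars.join [' '] (ws.map String.toList) := by
  rw [PySem.Str.toList_join]; rfl

lemma join_str_concat (pre : List String) (hne : pre ≠ []) (w : String) :
    PySem.Str.join " " (pre ++ [w]) = PySem.Str.join " " pre ++ " " ++ w := by
  apply String.toList_inj.mp
  rw [toList_join_sp]
  simp only [String.toList_append, toList_join_sp]
  rw [List.map_append, List.map_singleton, join_concat [' '] _ (by simpa using hne)]
  rfl

lemma strip_join_str (ws : List String) (hne : ws ≠ []) (hg : ∀ w ∈ ws, GoodS w) :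
    PySem.Str.strip (PySem.Str.join " " ws) = PySem.Str.join " " ws := by
  apply String.toList_inj.mp
  rw [PySem.Str.toList_strip, toList_join_sp]
  exact strip_join _ (by simpa using hne) (fun w hw => by
    obtain ⟨w', hw', rfl⟩ := List.mem_map.mp hw
    exact hg w' hw')

lemma join_str_nil : PySem.Str.join " " [] = "" := by
  apply String.toList_inj.mp
  rw [toList_join_sp]
  simp [PySem.Chars.join_nil]

lemma join_str_singleton (w : String) : PySem.Str.join " " [w] = w := by
  apply String.toList_inj.mp
  rw [toList_join_sp]
  simp [PySem.Chars.join_singleton]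

lemma step_strip (pre : List String) (w : String) (hg : ∀ x ∈ pre ++ [w], GoodS x) :
    PySem.Str.strip (PySem.Str.join " " pre ++ " " ++ w) = PySem.Str.join " " (pre ++ [w]) := by
  by_cases hpre : pre = []
  · subst hpre
    simp only [List.nil_append]
    rw [join_str_nil, join_str_singleton]
    apply String.toList_inj.mp
    rw [PySem.Str.toList_strip]
    have hlist : (("" : String) ++ " " ++ w).toList = ' ' :: w.toList := by simp
    rw [hlist, strip_space_cons _ (hg w (by simp))]
  · rw [← join_str_concat pre hpre w]
    exact strip_join_str _ (by simp) hg

def tA (max : Int) : List String → List String → Nat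
  | [], _ => 0
  | w :: rest, pre =>
      if PySem.Str.len (PySem.Str.join " " (pre ++ [w])) ≤ max then tA max rest (pre ++ [w]) + 1 else 0

lemma tA_le_length (max : Int) : ∀ (ws pre : List String), tA max ws pre ≤ ws.length
  | [], _ => by simp [tA]
  | w :: rest, pre => by
      rw [tA]
      split_ifs
      · simpa using tA_le_length max rest (pre ++ [w])
      · simp

lemma loop_inv (max : Int) : ∀ (ws pre : List String), (∀ w ∈ pre ++ ws, GoodS w) →
    wrapALoop max ws (PySem.Str.join " " pre) =
      (PySem.Str.join " " (pre ++ ws.take (tA max ws pre)),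
       if tA max ws pre = ws.length then "" else PySem.Str.join " " (ws.drop (tA max ws pre)))
  | [], pre, hg => by simp [wrapALoop, tA]
  | w :: rest, pre, hg => by
      rw [wrapALoop]
      rw [step_strip pre w (fun x hx => hg x (by
        rcases List.mem_append.mp hx with h | h
        · exact List.mem_append.mpr (Or.inl h)
        · simp at h; simp [h]))]
      rw [tA]
      by_cases hfit : PySem.Str.len (PySem.Str.join " " (pre ++ [w])) ≤ max
      · simp only [if_pos hfit]
        have IH := loop_inv max rest (pre ++ [w]) (by
          intro x hx
          apply hg x
          rcases List.mem_append.mp hx with h | h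
          · rcases List.mem_append.mp h with h | h
            · exact List.mem_append.mpr (Or.inl h)
            · simp at h; simp [h]
          · simp [h])
        rw [IH]
        by_cases hlen : tA max rest (pre ++ [w]) = rest.length
        · simp only [if_pos hlen,
            if_pos (show tA max rest (pre ++ [w]) + 1 = (w :: rest).length by
              rw [List.length_cons, hlen])]
          rw [List.take_succ_cons, List.append_assoc, List.singleton_append]
        · simp only [if_neg hlen,
            if_neg (show ¬(tA max rest (pre ++ [w]) + 1 = (w :: rest).length) by
              rw [List.length_cons]; omega)]
          rw [List.take_succ_cons, List.append_assoc, List.singleton_append, List.drop_succ_cons]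
      · simp only [if_neg hfit,
          if_neg (show ¬((0 : Nat) = (w :: rest).length) by simp)]
        rw [List.take_zero, List.append_nil, List.drop_zero]
        rw [strip_join_str _ (by simp) (fun x hx => hg x (List.mem_append.mpr (Or.inr hx)))]

def cntLe (max : Int) : List Int → Nat
  | [] => 0
  | x :: xs => if x ≤ max then cntLe max xs + 1 else 0

lemma len_one : PySem.Str.len " " = 1 := by decide

lemma len_join_concat (pre : List String) (hne : pre ≠ []) (w : String) :
    PySem.Str.len (PySem.Str.join " " (pre ++ [w])) =
      PySem.Str.len (PySem.Str.join " " pre) + 1 + PySem.Str.len w := by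
  rw [join_str_concat pre hne w, PySem.Str.len_append, PySem.Str.len_append, len_one]

lemma tA_eq_cntLe (max : Int) : ∀ (ws pre : List String), pre ≠ [] →
    tA max ws pre = cntLe max (accumStep (PySem.Str.len (PySem.Str.join " " pre)) (ws.map PySem.Str.len))
  | [], pre, _ => by simp [tA, accumStep, cntLe]
  | w :: rest, pre, hne => by
      rw [tA, List.map_cons, accumStep, cntLe, ← len_join_concat pre hne w]
      split_ifs with h
      · rw [tA_eq_cntLe max rest (pre ++ [w]) (by simp), len_join_concat pre hne w]
      · rfl

lemma accum_lb : ∀ (ls : List Int) (a : Int), (∀ x ∈ ls, 0 ≤ x) →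
    ∀ y ∈ accumStep a ls, a < y
  | [], a, _ => by simp [accumStep]
  | b :: bs, a, h => by
      intro y hy
      rw [accumStep] at hy
      rcases List.mem_cons.mp hy with hy | hy
      · have := h b (by simp); omega
      · have h1 := accum_lb bs (a + 1 + b) (fun x hx => h x (by simp [hx])) y hy
        have := h b (by simp); omega

lemma accum_pairwise : ∀ (ls : List Int) (a : Int), (∀ x ∈ ls, 0 ≤ x) →
    (accumStep a ls).Pairwise (· ≤ ·)
  | [], a, _ => by simp [accumStep]
  | b :: bs, a, h => by
      rw [accumStep]
      refine List.pairwise_cons.mpr ⟨?_, accum_pairwise bs (a + 1 + b) (fun x hx => h x (by simp [hx]))⟩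
      intro y hy
      exact le_of_lt (accum_lb bs (a + 1 + b) (fun x hx => h x (by simp [hx])) y hy)

lemma cntLe_spec (max : Int) : ∀ (ls : List Int),
    cntLe max ls ≤ ls.length ∧
    (∀ j, (hj : j < ls.length) → j < cntLe max ls → ls[j] ≤ max) ∧
    ((h : cntLe max ls < ls.length) → max < ls[cntLe max ls])
  | [] => by simp [cntLe]
  | x :: xs => by
      obtain ⟨h1, h2, h3⟩ := cntLe_spec max xs
      rw [cntLe]
      split_ifs with hx
      · refine ⟨by simpa using h1, ?_, ?_⟩
        · intro j hj hlt
          match j with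
          | 0 => simpa using hx
          | j + 1 => exact h2 j (by simpa using hj) (by omega)
        · intro h
          simpa using h3 (by simpa using h)
      · exact ⟨by simp, by omega, fun h => by simpa using hx⟩

lemma bisect_eq_cntLe (max : Int) (ls : List Int) (hp : ls.Pairwise (· ≤ ·)) :
    PySem.List.bisectRight ls max = cntLe max ls := by
  obtain ⟨b1, b2, b3⟩ := PySem.List.bisectRight_spec ls max hp
  obtain ⟨c1, c2, c3⟩ := cntLe_spec max ls
  by_contra hne
  rcases Nat.lt_or_ge (cntLe max ls) (PySem.List.bisectRight ls max) with h | h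
  · have hlt : cntLe max ls < ls.length := by omega
    have := b2 (cntLe max ls) hlt h
    have := c3 hlt
    omega
  · have hlt : PySem.List.bisectRight ls max < ls.length := by omega
    have := c2 (PySem.List.bisectRight ls max) hlt (by omega)
    have := b3 (PySem.List.bisectRight ls max) hlt (by omega)
    omega

lemma join_ne_empty (ws : List String) (hne : ws ≠ []) (hg : ∀ w ∈ ws, GoodS w) :
    PySem.Str.join " " ws ≠ "" := by
  obtain ⟨c, t, hh, _⟩ := join_head (ws.map String.toList) (by simpa using hne) (fun w hw => by
    obtain ⟨w', hw', rfl⟩ := List.mem_map.mp hw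
    exact hg w' hw')
  intro h
  have := congrArg String.toList h
  rw [toList_join_sp] at this
  rw [hh] at this
  simp at this

lemma len_nonneg (w : String) : 0 ≤ PySem.Str.len w := by
  rw [PySem.Str.len_eq]; exact Int.natCast_nonneg _

lemma tA_eq_cnt_cum (max : Int) (ws : List String) :
    tA max ws [] = cntLe max (accumulate1 (ws.map PySem.Str.len)) := by
  match ws with
  | [] => rfl
  | w :: rest =>
      rw [List.map_cons, accumulate1]
      rw [cntLe, tA, List.nil_append, join_str_singleton]
      split_ifs with h
      · rw [tA_eq_cntLe max rest [w] (by simp), join_str_singleton]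
      · rfl

lemma cum_pairwise (ws : List String) : (accumulate1 (ws.map PySem.Str.len)).Pairwise (· ≤ ·) := by
  match ws with
  | [] => simp [accumulate1]
  | w :: rest =>
      rw [List.map_cons, accumulate1]
      refine List.pairwise_cons.mpr ⟨?_, accum_pairwise _ _ (fun x hx => by
        obtain ⟨y, _, rfl⟩ := List.mem_map.mp hx
        exact len_nonneg y)⟩
      intro y hy
      exact le_of_lt (accum_lb _ _ (fun x hx => by
        obtain ⟨y', _, rfl⟩ := List.mem_map.mp hx
        exact len_nonneg y') y hy)

theorem AB_eq (text : String) (max_chars : Int) :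
    wrap_two_lines text max_chars = wrap_two_lines_alt text max_chars := by
  rw [wrap_two_lines, wrap_two_lines_alt]
  by_cases h1 : PySem.Str.strip text = ""
  · simp only [if_pos h1]
  · by_cases h2 : PySem.Str.len (PySem.Str.strip text) ≤ max_chars
    · simp only [if_neg h1, if_pos h2]
    · simp only [if_neg h1, if_neg h2]
      set s := PySem.Str.strip text with hs
      set words := PySem.Str.split₀ s with hwords
      have hgood : ∀ w ∈ words, GoodS w := good_split₀ s
      have hloop := loop_inv max_chars words [] (by simpa using hgood)
      rw [join_str_nil] at hloop
      have hk : PySem.List.bisectRight (accumulate1 (words.map PySem.Str.len)) max_chars = tA max_chars words [] := by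
        rw [bisect_eq_cntLe _ _ (cum_pairwise words), tA_eq_cnt_cum]
      clear_value s words
      rw [hloop, hk]
      rw [List.nil_append]
      by_cases hlen : tA max_chars words [] = words.length
      · simp only [if_pos hlen]
        simp
      · have hlt : tA max_chars words [] < words.length :=
          lt_of_le_of_ne (tA_le_length _ _ _) hlen
        have hdrop_ne : words.drop (tA max_chars words []) ≠ [] := by
          intro h
          have := List.drop_eq_nil_iff.mp h
          omega
        have hne2 : PySem.Str.join " " (words.drop (tA max_chars words [])) ≠ "" :=
          join_ne_empty _ hdrop_ne (fun w hw => hgood w (List.mem_of_mem_drop hw))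
        simp only [if_neg hlen]
        simp only [if_neg hne2]

-- ===== VERDICT (by name: the statement is the Claim_ definition above) =====
theorem wrap_two_lines_spec : Claim_equal_wrap_two_lines := by
  intro text max_chars _
  unfold Spec_wrap_two_lines
  exact AB_eq text max_chars
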